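-- pv_equiv track=rewrite | github.com/yg-moon/problem-solving | 2-websites/programmers/practice-kit/brute-force/Lv1-모의고사.py | solution
-- ===== SOURCE A (Python) =====
-- def solution(answers):
--     # 각 수포자들 찍는 패턴에 따른 배열 만들기
--     person_1 = [1, 2, 3, 4, 5]
--     person_2 = [2, 1, 2, 3, 2, 4, 2, 5]
--     person_3 = [3, 3, 1, 1, 2, 2, 4, 4, 5, 5]
--
--     # % 연산자를 이용해서 각 수포자가 몇 개 맞췄는지 계산
--     def solve(person):
--         correct = 0
--         length = len(person)
--         for i in range(len(answers)):
--             if answers[i] == person[i % length]: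
--                 correct += 1
--         return correct
--
--     # 최고점인 사람들을 출력
--     score = [solve(person_1), solve(person_2), solve(person_3)]
--     answer = []
--     for i in range(3):
--         if score[i] == max(score):
--             answer.append(i + 1)
--     return answer
-- ===== SOURCE B (Python) =====
-- def solution(answers):
--     # Histogram approach: one pass builds a counter keyed by (position mod 40, answer)
--     # (40 = lcm of the three pattern lengths), never touching the patterns; each
--     # pattern's score is then 40 table lookups.
--     p1 = [1, 2, 3, 4, 5]
--     p2 = [2, 1, 2, 3, 2, 4, 2, 5]
--     p3 = [3, 3, 1, 1, 2, 2, 4, 4, 5, 5]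
--     cnt = {}
--     for i, a in enumerate(answers):
--         key = (i % 40, a)
--         cnt[key] = cnt.get(key, 0) + 1
--     scores = [sum(cnt.get((r, p[r % len(p)]), 0) for r in range(40)) for p in (p1, p2, p3)]
--     best = max(scores)
--     return [k + 1 for k in range(3) if scores[k] == best]
-- ===== Notes on version B (the rewrite author's own statement) =====
-- stated objective: alternative
-- what changed: B replaces A's three pattern-comparing scans with a histogram: a single pass builds a dict counting answers by (index mod 40, value) -- 40 = lcm of the three pattern lengths -- without ever reading the patterns, and each score is then recovered as a sum of 40 table lookups cnt[(r, pattern[r % len])].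
import Mathlib
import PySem

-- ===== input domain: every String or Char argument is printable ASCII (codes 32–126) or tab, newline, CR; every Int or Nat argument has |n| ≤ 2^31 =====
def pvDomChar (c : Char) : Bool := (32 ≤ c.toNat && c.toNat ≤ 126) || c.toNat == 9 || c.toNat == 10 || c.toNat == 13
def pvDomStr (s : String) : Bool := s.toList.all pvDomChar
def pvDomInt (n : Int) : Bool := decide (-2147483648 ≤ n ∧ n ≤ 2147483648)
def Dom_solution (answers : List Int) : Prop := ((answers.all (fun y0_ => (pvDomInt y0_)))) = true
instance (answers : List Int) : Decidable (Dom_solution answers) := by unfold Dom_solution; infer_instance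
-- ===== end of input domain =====

-- B replaces A's three pattern-comparing scans with a histogram keyed by (index mod 40, answer)
-- built in one pass; each score is then a sum of 40 table lookups (alternative decomposition, same asymptotic cost).

-- ===== PORT A =====
-- helper `solve(person)`: indices are always in range, so pyGetD's default 0 is never read
def pvSolve (answers person : List Int) : Int :=
  let length := PySem.List.len person
  (PySem.List.pyRange 0 (PySem.List.len answers) 1).foldl
    (fun c i =>
      if PySem.List.pyGetD answers i 0 = PySem.List.pyGetD person (PySem.Int.mod i length) 0
      then c + 1 else c) 0

def solution (answers : List Int) : List Int :=
  let person1 : List Int := [1, 2, 3, 4, 5]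
  let person2 : List Int := [2, 1, 2, 3, 2, 4, 2, 5]
  let person3 : List Int := [3, 3, 1, 1, 2, 2, 4, 4, 5, 5]
  let score : List Int := [pvSolve answers person1, pvSolve answers person2, pvSolve answers person3]
  (PySem.List.pyRange 0 3 1).foldl
    (fun ans i =>
      if PySem.List.pyGetD score i 0 = (PySem.List.max? score (fun y => y)).getD 0
      then ans ++ [i + 1] else ans) []

-- ===== PORT B =====
-- helper: the score of one pattern read off the histogram, `sum(cnt.get((r, p[r % len(p)]), 0) for r in range(40))`
def pvScore (cnt : PySem.Dict (Int × Int) Int) (p : List Int) : Int :=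
  ((PySem.List.pyRange 0 40 1).map
    (fun r => cnt.getD (r, PySem.List.pyGetD p (PySem.Int.mod r (PySem.List.len p)) 0) 0)).sum

def solution_alt (answers : List Int) : List Int :=
  let p1 : List Int := [1, 2, 3, 4, 5]
  let p2 : List Int := [2, 1, 2, 3, 2, 4, 2, 5]
  let p3 : List Int := [3, 3, 1, 1, 2, 2, 4, 4, 5, 5]
  let cnt : PySem.Dict (Int × Int) Int :=
    (PySem.List.enumerate answers).foldl
      (fun d ia =>
        let key := (PySem.Int.mod ia.1 40, ia.2)
        d.insert key (d.getD key 0 + 1))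
      PySem.Dict.empty
  let scores : List Int := [pvScore cnt p1, pvScore cnt p2, pvScore cnt p3]
  let best := (PySem.List.max? scores (fun y => y)).getD 0
  ((PySem.List.pyRange 0 3 1).filter
      (fun k => PySem.List.pyGetD scores k 0 == best)).map (fun k => k + 1)

-- ===== PRECONDITION & SPEC =====
def Spec_solution (answers : List Int) (out : List Int) : Prop := out = solution_alt answers
instance (answers : List Int) (out : List Int) : Decidable (Spec_solution answers out) := by unfold Spec_solution; infer_instance

-- ===== CLAIM (what is proved, stated in full; the proofs are below) =====
def Claim_equal_solution : Prop := ∀ (answers : List Int), Dom_solution answers → Spec_solution answers (solution answers)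

-- ===== LEMMAS AND PROOFS =====

-- a sum of point indicators over a Nodup list containing m collapses to the indicator at m
theorem pv_sum_indicator (f : Int → Int) (a : Int) :
    ∀ (rs : List Int) (m : Int), rs.Nodup → m ∈ rs →
      ((rs.map (fun r => if ((m, a) : Int × Int) = (r, f r) then (1 : Nat) else 0)).sum
        = if a = f m then 1 else 0) := by
  intro rs
  induction rs with
  | nil => intro m _ h; cases h
  | cons r t ih =>
    intro m hnd hm
    rcases List.nodup_cons.mp hnd with ⟨hrt, hndt⟩
    simp only [List.map_cons, List.sum_cons]
    by_cases hrm : m = r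
    · subst hrm
      have hz : (t.map (fun r => if ((m, a) : Int × Int) = (r, f r) then (1 : Nat) else 0)).sum = 0 := by
        apply List.sum_eq_zero
        intro x hx
        rcases List.mem_map.mp hx with ⟨r', hr', hval⟩
        have hne : ((m, a) : Int × Int) ≠ (r', f r') := by
          intro he
          apply hrt
          rw [Prod.mk.injEq] at he
          exact he.1 ▸ hr'
        rw [if_neg hne] at hval
        exact hval.symm
      rw [hz]
      by_cases ha : a = f m
      · simp [ha]
      · have hne : ((m, a) : Int × Int) ≠ (m, f m) := by
          intro he; rw [Prod.mk.injEq] at he; exact ha he.2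
        simp [hne, ha]
    · have hmt : m ∈ t := by
        rcases List.mem_cons.mp hm with h | h
        · exact absurd h hrm
        · exact h
      have hne : ((m, a) : Int × Int) ≠ (r, f r) := by
        intro he; rw [Prod.mk.injEq] at he; exact hrm he.1
      rw [if_neg hne, ih m hndt hmt]
      ring

-- B's 40-lookup sum over key-counts equals a single countP over the pair list
theorem pv_sum_count (f : Int → Int) :
    ∀ (l : List (Int × Int)),
      ((PySem.List.pyRange 0 40 1).map
          (fun r => (l.map (fun ia => ((PySem.Int.mod ia.1 40, ia.2) : Int × Int))).count (r, f r))).sum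
        = l.countP (fun ia => ia.2 = f (PySem.Int.mod ia.1 40)) := by
  intro l
  induction l with
  | nil => simp
  | cons x t ih =>
    have hmem : PySem.Int.mod x.1 40 ∈ PySem.List.pyRange 0 40 1 := by
      rw [PySem.List.mem_pyRange_one]
      exact ⟨PySem.Int.mod_nonneg x.1 (by norm_num), PySem.Int.mod_lt x.1 (by norm_num)⟩
    have hsplit : ∀ r : Int,
        (List.map (fun ia => ((PySem.Int.mod ia.1 40, ia.2) : Int × Int)) (x :: t)).count (r, f r)
          = (t.map (fun ia => ((PySem.Int.mod ia.1 40, ia.2) : Int × Int))).count (r, f r)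
            + (if ((PySem.Int.mod x.1 40, x.2) : Int × Int) = (r, f r) then 1 else 0) := by
      intro r
      simp only [List.map_cons, List.count_cons]
      by_cases h : ((PySem.Int.mod x.1 40, x.2) : Int × Int) = (r, f r)
      · rw [if_pos h, if_pos (beq_iff_eq.mpr h)]
      · rw [if_neg h, if_neg (by simpa [beq_iff_eq] using h)]
    rw [List.map_congr_left (fun r _ => hsplit r), List.sum_map_add]
    rw [ih, pv_sum_indicator f x.2 _ (PySem.Int.mod x.1 40)
          (PySem.List.nodup_pyRange_one 0 40) hmem]
    rw [List.countP_cons]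
    by_cases h : x.2 = f (PySem.Int.mod x.1 40)
    · rw [if_pos h, if_pos (by simpa using h)]
    · rw [if_neg h, if_neg (by simpa using h)]

-- reducing mod 40 then mod L (L ∣ 40, 0 < L) is mod L
theorem pv_mod_mod (i L : Int) (hL : 0 < L) (hdvd : L ∣ 40) :
    PySem.Int.mod (PySem.Int.mod i 40) L = PySem.Int.mod i L := by
  rw [PySem.Int.mod_eq_emod_of_pos (by norm_num : (0:Int) < 40),
      PySem.Int.mod_eq_emod_of_pos hL, PySem.Int.mod_eq_emod_of_pos hL]
  exact Int.emod_emod_of_dvd i hdvd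

-- a sum of Nat-casts is the cast of the Nat sum
theorem pv_sum_cast (g : Int → Nat) :
    ∀ (l : List Int), (l.map (fun r => ((g r : Nat) : Int))).sum = (((l.map g).sum : Nat) : Int) := by
  intro l
  induction l with
  | nil => simp
  | cons r t ih => simp [ih]

-- A's solve(person) is a countP over the enumerated answers
theorem pv_solve_countP (answers person : List Int) :
    pvSolve answers person
      = ((PySem.List.enumerate answers).countP
          (fun ia => ia.2 = PySem.List.pyGetD person (PySem.Int.mod ia.1 (PySem.List.len person)) 0) : Int) := by
  unfold pvSolve
  rw [PySem.List.enumerate_eq_map_pyRange (d := 0), List.countP_map]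
  have h := PySem.List.foldl_count_if
      (fun i => decide (PySem.List.pyGetD answers i 0
        = PySem.List.pyGetD person (PySem.Int.mod i (PySem.List.len person)) 0))
      (PySem.List.pyRange 0 (PySem.List.len answers) 1) 0
  simpa using h

-- B's histogram score for one pattern is A's solve(person), for each of the three patterns
theorem pv_score_eq (answers person : List Int) (hL : 0 < PySem.List.len person)
    (hdvd : PySem.List.len person ∣ 40) :
    pvScore
      ((PySem.List.enumerate answers).foldl
        (fun d ia =>
          let key := (PySem.Int.mod ia.1 40, ia.2)
          d.insert key (d.getD key 0 + 1))
        PySem.Dict.empty) person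
      = pvSolve answers person := by
  unfold pvScore
  have hfold :
      (PySem.List.enumerate answers).foldl
        (fun d ia =>
          let key := (PySem.Int.mod ia.1 40, ia.2)
          d.insert key (d.getD key 0 + 1))
        PySem.Dict.empty
      = PySem.Dict.counter
          ((PySem.List.enumerate answers).map (fun ia => ((PySem.Int.mod ia.1 40, ia.2) : Int × Int))) := by
    rw [← PySem.Dict.foldl_insert_getD_add_one_eq_counter, List.foldl_map]
  rw [hfold]
  have hlookup : ∀ r : Int,
      (PySem.Dict.counter
          ((PySem.List.enumerate answers).map (fun ia => ((PySem.Int.mod ia.1 40, ia.2) : Int × Int)))).getD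
        (r, PySem.List.pyGetD person (PySem.Int.mod r (PySem.List.len person)) 0) 0
      = ((PySem.List.enumerate answers).map (fun ia => ((PySem.Int.mod ia.1 40, ia.2) : Int × Int))).count
          (r, PySem.List.pyGetD person (PySem.Int.mod r (PySem.List.len person)) 0) := by
    intro r
    exact PySem.Dict.getD_counter _ _
  rw [List.map_congr_left (fun r _ => hlookup r)]
  rw [pv_sum_cast (fun r =>
        ((PySem.List.enumerate answers).map (fun ia => ((PySem.Int.mod ia.1 40, ia.2) : Int × Int))).count
          (r, PySem.List.pyGetD person (PySem.Int.mod r (PySem.List.len person)) 0))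
        (PySem.List.pyRange 0 40 1)]
  rw [pv_sum_count (fun r => PySem.List.pyGetD person (PySem.Int.mod r (PySem.List.len person)) 0)
        (PySem.List.enumerate answers)]
  rw [pv_solve_countP]
  congr 1
  apply List.countP_congr
  intro ia _
  rw [pv_mod_mod ia.1 (PySem.List.len person) hL hdvd]

set_option maxRecDepth 8192 in
theorem solution_eq_alt (answers : List Int) : solution answers = solution_alt answers := by
  simp only [solution, solution_alt]
  rw [pv_score_eq answers [1, 2, 3, 4, 5] (by decide) (by decide),
      pv_score_eq answers [2, 1, 2, 3, 2, 4, 2, 5] (by decide) (by decide),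
      pv_score_eq answers [3, 3, 1, 1, 2, 2, 4, 4, 5, 5] (by decide) (by decide)]
  generalize pvSolve answers [1, 2, 3, 4, 5] = a
  generalize pvSolve answers [2, 1, 2, 3, 2, 4, 2, 5] = b
  generalize pvSolve answers [3, 3, 1, 1, 2, 2, 4, 4, 5, 5] = c
  have h3 : PySem.List.pyRange 0 3 1 = [0, 1, 2] := by decide
  have g0 : PySem.List.pyGetD [a, b, c] 0 0 = a := rfl
  have g1 : PySem.List.pyGetD [a, b, c] 1 0 = b := rfl
  have g2 : PySem.List.pyGetD [a, b, c] 2 0 = c := rfl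
  rw [h3]
  simp only [List.foldl_cons, List.foldl_nil, List.filter_cons, List.filter_nil, g0, g1, g2, PySem.List.max?_id_cons, beq_iff_eq]
  split_ifs <;> rfl

-- ===== VERDICT (by name: the statement is the Claim_ definition above) =====
theorem solution_spec : Claim_equal_solution := by
  intro answers _
  exact solution_eq_alt answers
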